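-- pv_equiv track=rewrite | github.com/dtchou802/python-practice | algo6.py | checkHires
-- ===== SOURCE A (Python) =====
-- def checkHires(array):
--     totalHires=1;
--     key = array[0];
--     for x in range (1,len(array)):
--         if (array[x] == 1):
--             totalHires+=1
--             break
--         if(array[x]<key):
--             totalHires+=1
--             key = array[x]
--     return totalHires
-- ===== SOURCE B (Python) =====
-- def checkHires(array):
--     # pass 1: find the index of the first 1 at position >= 1 (the break point)
--     p = None
--     for i in range(1, len(array)):
--         if array[i] == 1:
--             p = i
--             break
--     # pass 2: count strict left-to-right minima in the prefix before that 1
--     prefix = array if p is None else array[:p]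
--     count = 1
--     key = prefix[0]
--     for v in prefix[1:]:
--         if v < key:
--             count += 1
--             key = v
--     # a 1 always counts as one extra hire (even if it is not a new minimum)
--     return count + (1 if p is not None else 0)
-- ===== Notes on version B (the rewrite author's own statement) =====
-- stated objective: alternative
-- what changed: Replaces A's single interleaved loop (break-on-1 mixed with minimum tracking) by two separate passes: first locate the first 1 after index 0, then count strict left-to-right minima in the prefix before it and add 1 if a 1 was found.
-- outside the precondition, e.g. on checkHires([]): A raises IndexError, B raises IndexError
import Mathlib
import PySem

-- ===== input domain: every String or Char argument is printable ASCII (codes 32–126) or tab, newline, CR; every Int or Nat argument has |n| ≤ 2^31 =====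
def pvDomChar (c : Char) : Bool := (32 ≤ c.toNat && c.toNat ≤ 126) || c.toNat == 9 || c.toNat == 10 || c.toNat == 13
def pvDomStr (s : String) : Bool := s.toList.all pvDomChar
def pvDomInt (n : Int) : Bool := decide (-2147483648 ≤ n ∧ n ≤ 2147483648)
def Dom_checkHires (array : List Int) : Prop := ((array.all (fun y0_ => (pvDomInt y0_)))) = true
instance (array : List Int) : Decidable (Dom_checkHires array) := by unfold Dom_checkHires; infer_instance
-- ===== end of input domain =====

-- B restructures A's single interleaved loop into two passes (find the first 1, then count minima in the prefix); same cost, different decomposition.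


-- ===== PORT A =====
-- A's for-loop over range(1, len(array)) walks the tail sequentially; the break becomes
-- the non-recursive branch of this structural recursion over the tail with state (totalHires, key).
def checkHiresLoop : List Int → Int → Int → Int
  | [], totalHires, _ => totalHires
  | a :: rest, totalHires, key =>
    if a == 1 then totalHires + 1
    else if a < key then checkHiresLoop rest (totalHires + 1) a
    else checkHiresLoop rest totalHires key

def checkHires (array : List Int) : Int :=
  match array with
  | [] => 0            -- unreachable under Pre_: array[0] raises IndexError in Python
  | key :: rest => checkHiresLoop rest 1 key

-- ===== PORT B =====
-- pass 1 of Source B: index (within the tail) of the first 1 at position >= 1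
def findOne : List Int → Option Nat
  | [] => none
  | a :: r => if a == 1 then some 0 else (findOne r).map (· + 1)

-- pass 2 of Source B: the loop body over prefix[1:] with state (count, key)
def hireStep (ck : Int × Int) (v : Int) : Int × Int :=
  if v < ck.2 then (ck.1 + 1, v) else ck

def checkHires_alt (array : List Int) : Int :=
  match array with
  | [] => 0            -- unreachable under Pre_: prefix[0] raises IndexError in Python
  | a :: rest =>
    match findOne rest with
    | none => ((rest.foldl hireStep (1, a)).1)
    | some p => (((rest.take p).foldl hireStep (1, a)).1) + 1

-- ===== PRECONDITION & SPEC =====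
-- Pre_ excludes only the empty list, on which Python A (and B) raise IndexError.
def Pre_checkHires (array : List Int) : Prop := array ≠ []
instance (array : List Int) : Decidable (Pre_checkHires array) := by unfold Pre_checkHires; infer_instance
def pvWitness_checkHires : List Int := [5, 3, 4, 1, 2]

def Spec_checkHires (array : List Int) (out : Int) : Prop := out = checkHires_alt array
instance (array : List Int) (out : Int) : Decidable (Spec_checkHires array out) := by unfold Spec_checkHires; infer_instance

-- ===== CLAIM (what is proved, stated in full; the proofs are below) =====
def Claim_equal_checkHires : Prop := ∀ (array : List Int), Dom_checkHires array → Pre_checkHires array → Spec_checkHires array (checkHires array)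

-- ===== LEMMAS AND PROOFS =====
-- A's interleaved loop equals B's split: fold up to the first 1 (whole list if none), plus 1 for the break.
theorem checkHiresLoop_eq (rest : List Int) : ∀ (total key : Int),
    checkHiresLoop rest total key =
      match findOne rest with
      | none => (rest.foldl hireStep (total, key)).1
      | some p => ((rest.take p).foldl hireStep (total, key)).1 + 1 := by
  induction rest with
  | nil => intro total key; simp [checkHiresLoop, findOne]
  | cons a r ih =>
    intro total key
    by_cases h1 : a = 1
    · simp [checkHiresLoop, findOne, h1]
    · by_cases h2 : a < key
      · rw [show checkHiresLoop (a :: r) total key = checkHiresLoop r (total + 1) a from by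
              simp [checkHiresLoop, h1, h2], ih]
        cases hf : findOne r with
        | none => simp [findOne, h1, hf, hireStep, h2]
        | some p => simp [findOne, h1, hf, hireStep, h2]
      · rw [show checkHiresLoop (a :: r) total key = checkHiresLoop r total key from by
              simp [checkHiresLoop, h1, h2], ih]
        cases hf : findOne r with
        | none => simp [findOne, h1, hf, hireStep, h2]
        | some p => simp [findOne, h1, hf, hireStep, h2]

-- ===== VERDICT (by name: the statement is the Claim_ definition above) =====
theorem checkHires_spec : Claim_equal_checkHires := by
  intro array _ hpre
  cases array with
  | nil => exact absurd rfl hpre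
  | cons a rest =>
    show checkHires (a :: rest) = checkHires_alt (a :: rest)
    simp only [checkHires, checkHires_alt]
    exact checkHiresLoop_eq rest 1 a
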